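-- pv_equiv track=rewrite | github.com/Ryannn06/sdi_back-end-challenge-1 | car_rental_problem.py | calculate
-- ===== SOURCE A (Python) =====
-- import math
--
-- rental_cost = { "S": {"seat":5, "cost":5000}, "M": {"seat":10, "cost":8000}, "L": {"seat":15, "cost":12000}}
--
-- def calculate(num_seat):
-- 	#create a temporary list
-- 	rec = []
--
-- 	for keys in rental_cost.keys():
-- 		#calculate no. of cars needed to accomodate required seats
-- 		#returns round up value
-- 		total_car = math.ceil(num_seat / rental_cost[keys]["seat"])
--
-- 		#calculate total cost by total car times rental cost
-- 		total_cost = total_car * rental_cost[keys]["cost"]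
--
-- 		#append the total cost together with the size of the car
-- 		rec.append([keys, total_car, total_cost])
--
--
-- 	#check if temporary list has data
-- 	if len(rec) > 0:
--
-- 		#sort list by cost to identify the cheapest
-- 		cheapest = sorted(rec, key=lambda x: x[2], reverse=True)
--
-- 		#initialize most optimized car size and cost
-- 		text = "{} x {}".format(cheapest[-1][0], cheapest[-1][1])
-- 		total = "Total = PHP {}".format(cheapest[-1][2])
--
-- 		#clear temporary list
-- 		rec.clear()
-- 		return(str(text) + "\n" + str(total))
-- 	else:
-- 		#if no data
-- 		return("Error: Please try again later.")
-- ===== SOURCE B (Python) =====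
-- rental_cost = { "S": {"seat":5, "cost":5000}, "M": {"seat":10, "cost":8000}, "L": {"seat":15, "cost":12000}}
--
-- def calculate(num_seat):
-- 	# single linear scan over the options, keeping the running cheapest;
-- 	# '<=' makes later entries win ties, like A's stable reverse-sort last element
-- 	best = None
-- 	for key, spec in rental_cost.items():
-- 		cars = -(-num_seat // spec["seat"])
-- 		cost = cars * spec["cost"]
-- 		if best is None or cost <= best[2]:
-- 			best = (key, cars, cost)
-- 	return "{} x {}\nTotal = PHP {}".format(*best)
-- ===== Notes on version B (the rewrite author's own statement) =====
-- stated objective: simpler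
-- what changed: Replaces the temporary list plus stable reverse-sort-and-take-last with a single linear pass that keeps the running cheapest option (<= so later entries win ties, matching the stable sort's last element).
import Mathlib
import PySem

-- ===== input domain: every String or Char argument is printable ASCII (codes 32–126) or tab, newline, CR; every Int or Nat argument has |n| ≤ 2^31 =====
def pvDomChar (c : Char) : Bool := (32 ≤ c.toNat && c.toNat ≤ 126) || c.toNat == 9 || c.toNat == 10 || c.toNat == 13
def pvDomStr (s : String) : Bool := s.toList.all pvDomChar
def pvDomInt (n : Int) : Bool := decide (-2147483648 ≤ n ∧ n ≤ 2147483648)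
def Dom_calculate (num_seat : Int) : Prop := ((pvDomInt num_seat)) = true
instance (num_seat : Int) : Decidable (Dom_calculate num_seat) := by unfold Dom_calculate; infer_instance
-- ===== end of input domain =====

-- B replaces A's temporary list + stable reverse sort with one linear pass keeping the running cheapest (simpler).


-- ===== PORT A =====
-- the module constant rental_cost, as an association list (key ↦ (seat, cost)) in insertion order
def rentalCost : PySem.Dict String (Int × Int) :=
  PySem.Dict.ofList [("S", (5, 5000)), ("M", (10, 8000)), ("L", (15, 12000))]

-- math.ceil(n / d): exact on Dom (|n| ≤ 2^31, d ∈ {5,10,15}: the float quotient is never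
-- rounded across an integer boundary), ported as the integer ceiling division -(-n // d)
def pyCeilDiv (n d : Int) : Int := -(PySem.Int.floordiv (-n) d)

def calculate (num_seat : Int) : String :=
  -- rec = []; for keys in rental_cost.keys(): ... rec.append([keys, total_car, total_cost])
  let rec_ : List (String × Int × Int) :=
    (PySem.Dict.keys rentalCost).foldl (fun acc k =>
      let spec := PySem.Dict.getD rentalCost k (0, 0)  -- lookups of keys() entries never miss
      let total_car := pyCeilDiv num_seat spec.1
      let total_cost := total_car * spec.2
      acc ++ [(k, total_car, total_cost)]) []
  if rec_.length > 0 then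
    let cheapest := PySem.List.sorted rec_ (fun x => x.2.2) true
    -- cheapest[-1]; the list is nonempty here, so the index never fails
    let last := (PySem.List.pyGet? cheapest (-1)).getD ("", 0, 0)
    let text := last.1 ++ " x " ++ PySem.Int.toStr last.2.1
    let total := "Total = PHP " ++ PySem.Int.toStr last.2.2
    text ++ "\n" ++ total
  else
    "Error: Please try again later."

-- ===== PORT B =====
def calculate_alt (num_seat : Int) : String :=
  let best : Option (String × Int × Int) :=
    (PySem.Dict.items rentalCost).foldl (fun best kv =>
      let cars := -(PySem.Int.floordiv (-num_seat) kv.2.1)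
      let cost := cars * kv.2.2
      match best with
      | none => some (kv.1, cars, cost)
      | some b => if cost ≤ b.2.2 then some (kv.1, cars, cost) else some b) none
  match best with
  | some b => b.1 ++ " x " ++ PySem.Int.toStr b.2.1 ++ "\nTotal = PHP " ++ PySem.Int.toStr b.2.2
  | none => ""  -- unreachable: rental_cost is nonempty (Source B would raise here)

-- ===== PRECONDITION & SPEC =====
def Spec_calculate (num_seat : Int) (out : String) : Prop := out = calculate_alt num_seat
instance (num_seat : Int) (out : String) : Decidable (Spec_calculate num_seat out) := by unfold Spec_calculate; infer_instance

-- ===== CLAIM (what is proved, stated in full; the proofs are below) =====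
def Claim_equal_calculate : Prop := ∀ (num_seat : Int), Dom_calculate num_seat → Spec_calculate num_seat (calculate num_seat)

-- ===== LEMMAS AND PROOFS =====

-- ===== VERDICT (by name: the statement is the Claim_ definition above) =====
theorem calculate_spec : Claim_equal_calculate := by
  intro n _
  unfold Spec_calculate calculate calculate_alt
  have hk : PySem.Dict.keys rentalCost = ["S","M","L"] := rfl
  have hi : PySem.Dict.items rentalCost = [("S",(5,5000)),("M",(10,8000)),("L",(15,12000))] := rfl
  rw [hk, hi]
  have hS : PySem.Dict.getD rentalCost "S" ((0:Int),(0:Int)) = (5,5000) := rfl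
  have hM : PySem.Dict.getD rentalCost "M" ((0:Int),(0:Int)) = (10,8000) := rfl
  have hL : PySem.Dict.getD rentalCost "L" ((0:Int),(0:Int)) = (15,12000) := rfl
  simp only [List.foldl, hS, hM, hL, pyCeilDiv, List.nil_append, List.cons_append]
  generalize -PySem.Int.floordiv (-n) 5 = a
  generalize -PySem.Int.floordiv (-n) 10 = b
  generalize -PySem.Int.floordiv (-n) 15 = c
  rw [PySem.List.sorted_rev_eq_foldl_insertBy]
  simp only [List.foldl, PySem.List.insertBy]
  split_ifs <;> simp_all [PySem.List.insertBy, PySem.List.pyGet?, PySem.List.pyIdx?] <;>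
    try omega
  all_goals (split_ifs <;> simp_all <;> try omega)
  all_goals simp [String.append_assoc]
  all_goals rw [← String.append_assoc]
  all_goals rfl
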